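-- pv_equiv track=rewrite | github.com/thuonguyenvan/CompetitiveProgramming | CONTEST/CODEFORCES/Codeforces Round 891 (Div. 3)/D.py | solve
-- ===== SOURCE A (Python) =====
-- def solve(n, a, b):
--     res = []
--     max_diff = float('-inf')
--
--     for i in range(n):
--         if a[i] - b[i] > max_diff:
--             max_diff = a[i] - b[i]
--             res = [i + 1]
--         elif a[i] - b[i] == max_diff:
--             res.append(i + 1)
--
--     return res
-- ===== SOURCE B (Python) =====
-- def solve(n, a, b):
--     diffs = [a[i] - b[i] for i in range(n)]
--     if not diffs:
--         return []
--     m = max(diffs)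
--     return [i for i, d in enumerate(diffs, 1) if d == m]
-- ===== Notes on version B (the rewrite author's own statement) =====
-- stated objective: simpler
-- what changed: Replaces the single running-max loop with reset/append control flow by a two-phase decomposition: build the diff list, take its max, then filter the 1-based positions equal to it.
import Mathlib
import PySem

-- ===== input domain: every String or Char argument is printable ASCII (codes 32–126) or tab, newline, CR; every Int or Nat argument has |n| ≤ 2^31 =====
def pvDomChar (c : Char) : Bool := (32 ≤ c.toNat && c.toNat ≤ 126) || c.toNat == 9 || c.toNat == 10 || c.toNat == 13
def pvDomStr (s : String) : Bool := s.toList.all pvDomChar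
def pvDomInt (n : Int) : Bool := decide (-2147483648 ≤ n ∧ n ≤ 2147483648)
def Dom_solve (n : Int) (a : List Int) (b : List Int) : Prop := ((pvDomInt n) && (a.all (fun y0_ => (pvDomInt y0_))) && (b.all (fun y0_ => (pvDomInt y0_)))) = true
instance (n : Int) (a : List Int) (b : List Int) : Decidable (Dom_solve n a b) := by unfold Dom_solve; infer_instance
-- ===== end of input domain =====

-- B is simpler: it computes the diff list, takes its max, then filters the
-- positions equal to it, instead of A's running-max loop with reset/append.

-- ===== PORT A =====
-- loop body of A: state = (res, max_diff) with 'none' playing float('-inf');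
-- the pair p is (i, a[i]-b[i])
def solveStep (st : List Int × Option Int) (p : Int × Int) : List Int × Option Int :=
  match st.2 with
  | none => ([p.1 + 1], some p.2)
  | some m =>
    if m < p.2 then ([p.1 + 1], some p.2)
    else if p.2 = m then (st.1 ++ [p.1 + 1], st.2)
    else st

def solve (n : Int) (a : List Int) (b : List Int) : List Int :=
  ((PySem.List.pyRange 0 n 1).foldl
    (fun st i => solveStep st (i, PySem.List.pyGetD a i 0 - PySem.List.pyGetD b i 0))
    ([], none)).1

-- ===== PORT B =====
def solve_alt (n : Int) (a : List Int) (b : List Int) : List Int :=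
  let diffs := (PySem.List.pyRange 0 n 1).map
    (fun i => PySem.List.pyGetD a i 0 - PySem.List.pyGetD b i 0)
  match PySem.List.max? diffs (fun x => x) with
  | none => []
  | some m => ((PySem.List.enumerate diffs 1).filter (fun p => p.2 = m)).map (·.1)

-- ===== PRECONDITION & SPEC =====
-- Pre_: A indexes a[i], b[i] for every i in range(n); outside this it raises IndexError.
def Pre_solve (n : Int) (a : List Int) (b : List Int) : Prop :=
  n ≤ (a.length : Int) ∧ n ≤ (b.length : Int)
instance (n : Int) (a : List Int) (b : List Int) : Decidable (Pre_solve n a b) := by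
  unfold Pre_solve; infer_instance
def pvWitness_solve : Int × List Int × List Int := (2, [3, 1], [1, 1])

def Spec_solve (n : Int) (a : List Int) (b : List Int) (out : List Int) : Prop := out = solve_alt n a b
instance (n : Int) (a : List Int) (b : List Int) (out : List Int) : Decidable (Spec_solve n a b out) := by unfold Spec_solve; infer_instance

-- ===== CLAIM (what is proved, stated in full; the proofs are below) =====
def Claim_equal_solve : Prop := ∀ (n : Int) (a : List Int) (b : List Int), Dom_solve n a b → Pre_solve n a b → Spec_solve n a b (solve n a b)

-- ===== LEMMAS AND PROOFS =====

-- no element of l strictly below v is kept by the filter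
theorem filter_enumerate_lt (l : List Int) (s v : Int) (h : ∀ y ∈ l, y < v) :
    (PySem.List.enumerate l s).filter (fun p => p.2 = v) = [] := by
  rw [List.filter_eq_nil_iff]
  intro p hp
  rcases (PySem.List.mem_enumerate_iff _ _ _).1 hp with ⟨k, hk, rfl⟩
  simpa using (h _ (List.getElem_mem hk)).ne

-- The core invariant, over an arbitrary diff list l:
-- A's fold over the enumeration of l equals "max, then filter the positions".
theorem solve_core (l : List Int) (s : Int) :
    (PySem.List.enumerate l s).foldl solveStep ([], none) =
      match PySem.List.max? l (fun x => x) with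
      | none => ([], none)
      | some m => (((PySem.List.enumerate l (s + 1)).filter (fun p => p.2 = m)).map (·.1), some m) := by
  induction l using List.reverseRecOn generalizing s with
  | nil => simp [PySem.List.enumerate_nil, PySem.List.max?]
  | append_singleton t x ih =>
    rw [PySem.List.enumerate_append, List.foldl_append, ih]
    cases t with
    | nil =>
      simp [PySem.List.enumerate_nil, PySem.List.enumerate_cons, PySem.List.max?, solveStep]
    | cons y ts =>
      have hm : PySem.List.max? (y :: ts) (fun x => x) = some (ts.foldl max y) :=
        PySem.List.max?_id_cons y ts
      have hm2 : PySem.List.max? ((y :: ts) ++ [x]) (fun x => x)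
          = some (max (ts.foldl max y) x) := by
        rw [List.cons_append, PySem.List.max?_id_cons, List.foldl_append]
        simp
      have hall : ∀ z ∈ y :: ts, z ≤ ts.foldl max y :=
        fun z hz => by simpa using PySem.List.max?_isMax hm z hz
      rw [hm, hm2]
      dsimp only
      have hsing : ∀ t0 : Int, PySem.List.enumerate [x] t0 = [(t0, x)] := by
        intro t0; simp [PySem.List.enumerate_cons, PySem.List.enumerate_nil]
      rw [PySem.List.enumerate_append (s := s + 1), hsing, hsing, List.foldl_cons,
        List.foldl_nil, List.filter_append, List.map_append]
      by_cases h1 : ts.foldl max y < x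
      · have hmax : max (ts.foldl max y) x = x := max_eq_right h1.le
        have hz : (PySem.List.enumerate (y :: ts) (s + 1)).filter (fun p => p.2 = x) = [] :=
          filter_enumerate_lt _ _ _ (fun z hz => lt_of_le_of_lt (hall z hz) h1)
        rw [hmax, hz]
        simp [solveStep, h1]
        ring
      · have hmax : max (ts.foldl max y) x = ts.foldl max y := max_eq_left (not_lt.1 h1)
        rw [hmax]
        by_cases h2 : x = ts.foldl max y
        · simp [solveStep, h2]
          ring
        · simp [solveStep, h1, h2]

-- A's loop over range(n) is the fold of solveStep over the enumeration of the diff list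
theorem solve_fold_eq (n : Int) (a b : List Int) (hn : 0 ≤ n) :
    (PySem.List.pyRange 0 n 1).foldl
      (fun st i => solveStep st (i, PySem.List.pyGetD a i 0 - PySem.List.pyGetD b i 0)) ([], none)
    = (PySem.List.enumerate ((PySem.List.pyRange 0 n 1).map
        (fun i => PySem.List.pyGetD a i 0 - PySem.List.pyGetD b i 0)) 0).foldl
        solveStep ([], none) := by
  rw [PySem.List.enumerate_eq_map_pyRange (d := 0)]
  have hlen : PySem.List.len ((PySem.List.pyRange 0 n 1).map
      (fun i => PySem.List.pyGetD a i 0 - PySem.List.pyGetD b i 0)) = n := by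
    simp [PySem.List.length_pyRange_one]
    omega
  rw [hlen, List.foldl_map]
  apply PySem.List.foldl_congr_mem
  intro acc x hx
  have hx' := (PySem.List.mem_pyRange_one).1 hx
  rw [PySem.List.pyGetD_map_pyRange_of_nonneg _ _ _ _ hx'.1 hx'.2]

theorem solve_spec : Claim_equal_solve := by
  intro n a b _ _
  unfold Spec_solve solve solve_alt
  by_cases hn : 0 ≤ n
  · rw [solve_fold_eq n a b hn, solve_core]
    cases hmx : PySem.List.max? ((PySem.List.pyRange 0 n 1).map
        (fun i => PySem.List.pyGetD a i 0 - PySem.List.pyGetD b i 0)) (fun x => x) with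
    | none => simp [hmx]
    | some m => simp [hmx]
  · rw [PySem.List.pyRange_one_eq_nil (by omega)]
    simp [PySem.List.max?]
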